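-- pv_equiv track=rewrite | github.com/bohdaholas/ip_calc | ip_calc.py | bin_to_decimal_address
-- ===== SOURCE A (Python) =====
-- def bin_to_decimal_address(bin_address):
--     """
--     Convert binary address to decimal
--     >>> bin_to_decimal_address('11111111.11111111.11111111.11111111')
--     '255.255.255.255'
--     """
--     bin_blocks = bin_address.split('.')
--     decimal_blocks = []
--     for bin_block in bin_blocks:
--         bin_block = reversed(bin_block)
--         decimal_block = 0
--         for power, digit in enumerate(bin_block):
--             if digit == '1':
--                 decimal_block += 2 ** power
--         decimal_blocks.append(str(decimal_block))
--     return '.'.join(decimal_blocks)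
-- ===== SOURCE B (Python) =====
-- def bin_to_decimal_address(bin_address):
--     """Convert binary address to decimal: Horner-rule forward fold per block
--     (no reversing/power arithmetic); same lenient treatment of non-'1' chars."""
--     def horner(block):
--         acc = 0
--         for ch in block:
--             acc = acc * 2 + (ch == '1')
--         return str(acc)
--     return '.'.join(horner(b) for b in bin_address.split('.'))
-- ===== Notes on version B (the rewrite author's own statement) =====
-- stated objective: idiomatic
-- what changed: Each block is evaluated by a single forward left-to-right Horner fold (acc = acc*2 + bit) instead of reversing the block and summing 2**power over enumerate; the outer append-loop becomes a join over a generator.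
import Mathlib
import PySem

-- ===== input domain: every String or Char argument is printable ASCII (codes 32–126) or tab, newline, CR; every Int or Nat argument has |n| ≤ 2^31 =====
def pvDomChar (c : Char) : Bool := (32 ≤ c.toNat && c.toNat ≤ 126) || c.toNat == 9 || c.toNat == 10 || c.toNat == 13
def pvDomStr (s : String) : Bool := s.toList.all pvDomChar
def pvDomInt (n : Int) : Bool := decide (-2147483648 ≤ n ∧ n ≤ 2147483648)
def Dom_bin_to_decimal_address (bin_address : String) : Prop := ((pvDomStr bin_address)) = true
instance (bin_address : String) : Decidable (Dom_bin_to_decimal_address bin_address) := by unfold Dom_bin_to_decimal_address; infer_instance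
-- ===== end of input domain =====

-- B replaces A's reverse/enumerate/2**power block summation with a single forward
-- Horner fold per block; equal output on every input (A is total).

-- ===== PORT A =====
-- inner loop of A: enumerate over the reversed block, state = (power, decimal_block)
def pvBlockA (cs : List Char) : Int :=
  (cs.reverse.foldl
    (fun (st : Nat × Int) digit =>
      (st.1 + 1, if digit = '1' then st.2 + 2 ^ st.1 else st.2))
    (0, 0)).2

def bin_to_decimal_address (bin_address : String) : String :=
  let bin_blocks := PySem.Chars.splitOn bin_address.toList ".".toList
  let decimal_blocks := bin_blocks.foldl
    (fun (acc : List (List Char)) bin_block => acc ++ [PySem.Int.toChars (pvBlockA bin_block)]) []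
  String.ofList (PySem.Chars.join ".".toList decimal_blocks)

-- ===== PORT B =====
-- inner loop of B: forward Horner fold, acc = acc*2 + (ch == '1')
def pvBlockB (cs : List Char) : Int :=
  cs.foldl (fun acc ch => acc * 2 + (if ch = '1' then 1 else 0)) 0

def bin_to_decimal_address_alt (bin_address : String) : String :=
  String.ofList (PySem.Chars.join ".".toList
    ((PySem.Chars.splitOn bin_address.toList ".".toList).map
      (fun b => PySem.Int.toChars (pvBlockB b))))

-- ===== PRECONDITION & SPEC =====
def Spec_bin_to_decimal_address (bin_address : String) (out : String) : Prop := out = bin_to_decimal_address_alt bin_address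
instance (bin_address : String) (out : String) : Decidable (Spec_bin_to_decimal_address bin_address out) := by unfold Spec_bin_to_decimal_address; infer_instance

-- ===== CLAIM (what is proved, stated in full; the proofs are below) =====
def Claim_equal_bin_to_decimal_address : Prop := ∀ (bin_address : String), Dom_bin_to_decimal_address bin_address → Spec_bin_to_decimal_address bin_address (bin_to_decimal_address bin_address)

-- ===== LEMMAS AND PROOFS =====

-- little-endian value of a bit string (proof-only reference function)
def pvValLE (cs : List Char) : Int :=
  match cs with
  | [] => 0
  | c :: t => (if c = '1' then 1 else 0) + 2 * pvValLE t

lemma pvValLE_append_singleton (xs : List Char) (c : Char) :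
    pvValLE (xs ++ [c]) = pvValLE xs + (if c = '1' then 1 else 0) * 2 ^ xs.length := by
  induction xs with
  | nil => simp [pvValLE]
  | cons x t ih => simp [pvValLE, ih, List.length_cons]; split_ifs <;> ring

lemma pvBlockA_fold (ds : List Char) :
    ∀ (p : Nat) (a : Int),
      (ds.foldl (fun (st : Nat × Int) digit =>
        (st.1 + 1, if digit = '1' then st.2 + 2 ^ st.1 else st.2)) (p, a)).2
      = a + 2 ^ p * pvValLE ds := by
  induction ds with
  | nil => intro p a; simp [pvValLE]
  | cons c t ih =>
    intro p a
    simp only [List.foldl_cons, ih, pvValLE, pow_succ]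
    split_ifs <;> ring

lemma pvBlockB_fold (cs : List Char) :
    ∀ (a : Int),
      cs.foldl (fun acc ch => acc * 2 + (if ch = '1' then 1 else 0)) a
      = a * 2 ^ cs.length + pvValLE cs.reverse := by
  induction cs with
  | nil => intro a; simp [pvValLE]
  | cons c t ih =>
    intro a
    simp only [List.foldl_cons, ih, List.reverse_cons, pvValLE_append_singleton,
      List.length_reverse, List.length_cons, pow_succ]
    ring

lemma pvBlock_eq (cs : List Char) : pvBlockA cs = pvBlockB cs := by
  unfold pvBlockA pvBlockB
  rw [pvBlockA_fold, pvBlockB_fold]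
  simp

-- ===== VERDICT (by name: the statement is the Claim_ definition above) =====
theorem bin_to_decimal_address_spec : Claim_equal_bin_to_decimal_address := by
  intro s _
  show bin_to_decimal_address s = bin_to_decimal_address_alt s
  simp only [bin_to_decimal_address, bin_to_decimal_address_alt,
    PySem.List.foldl_append_singleton_eq_map, pvBlock_eq, List.nil_append]
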